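-- pv_equiv track=rewrite | github.com/besteffects/Python_tutorials | Week7 Final exam_try2.py | get_diagonal_and_non_diagonal2
-- ===== SOURCE A (Python) =====
-- def get_diagonal_and_non_diagonal2(L):
--     '''(list of list of int) -> tuple of (list of int, list of int)
--
--     Return a tuple where the first item is a list of the values on the
--     diagonal of square nested list L and the second item is a list of the rest
--     of the values in L.
--
--     >>> get_diagonal_and_non_diagonal1([[1,  3,  5], [2,  4,  5], [4,  0,  8]])
--     ([1, 4, 8], [3, 5, 2, 5, 4, 0])
--     '''
--
--     diagonal = []
--     non_diagonal = []
--     for row in range(len(L)):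
--         for col in range(len(L)):
--
--             if row == col:
--                 diagonal.append(L[row][col])
--             else:
--                 non_diagonal.append(L[row][col])
--
--     return (diagonal, non_diagonal)
-- ===== SOURCE B (Python) =====
-- def get_diagonal_and_non_diagonal2(L):
--     n = len(L)
--     diagonal = [row[i] for i, row in enumerate(L)]
--     non_diagonal = [x for i, row in enumerate(L) for x in row[:i] + row[i + 1:n]]
--     return (diagonal, non_diagonal)
-- ===== Notes on version B (the rewrite author's own statement) =====
-- stated objective: idiomatic
-- what changed: Replaced the per-cell double loop with its row==col test by per-row direct indexing for the diagonal and per-row slicing (row[:i] + row[i+1:n]) for the non-diagonal, built as two comprehensions.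
import Mathlib
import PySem

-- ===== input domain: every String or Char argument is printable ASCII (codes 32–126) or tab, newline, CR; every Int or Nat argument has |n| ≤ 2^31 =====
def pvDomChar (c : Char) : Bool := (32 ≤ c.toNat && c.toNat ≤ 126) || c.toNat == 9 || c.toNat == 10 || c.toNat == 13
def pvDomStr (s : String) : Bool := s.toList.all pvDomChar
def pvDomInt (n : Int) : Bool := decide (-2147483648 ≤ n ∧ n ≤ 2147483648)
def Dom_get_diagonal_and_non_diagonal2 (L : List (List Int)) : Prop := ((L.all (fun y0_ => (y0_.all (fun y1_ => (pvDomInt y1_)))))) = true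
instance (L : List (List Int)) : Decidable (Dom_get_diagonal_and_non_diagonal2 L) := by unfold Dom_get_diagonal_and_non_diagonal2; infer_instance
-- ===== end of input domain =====

-- B replaces A's per-cell double loop (with its row==col test) by per-row indexing for the
-- diagonal and per-row slicing for the rest; equally fast, more idiomatic.

-- ===== PORT A =====
-- Literal port of A's nested index loops; L[row][col] is pyGetD (in range under Pre_).
def get_diagonal_and_non_diagonal2 (L : List (List Int)) : List Int × List Int :=
  let n : Int := L.length
  (PySem.List.pyRange 0 n 1).foldl (fun st row =>
    (PySem.List.pyRange 0 n 1).foldl (fun st col =>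
      if row == col then
        (st.1 ++ [PySem.List.pyGetD (PySem.List.pyGetD L row []) col 0], st.2)
      else
        (st.1, st.2 ++ [PySem.List.pyGetD (PySem.List.pyGetD L row []) col 0])) st) ([], [])

-- ===== PORT B =====
-- Literal port of Source B: two comprehensions over enumerate(L); row[i] and the slices row[:i], row[i+1:n].
def get_diagonal_and_non_diagonal2_alt (L : List (List Int)) : List Int × List Int :=
  let n : Int := L.length
  ((PySem.List.enumerate L 0).map (fun p => PySem.List.pyGetD p.2 p.1 0),
   (PySem.List.enumerate L 0).flatMap (fun p =>
     PySem.List.slice p.2 none (some p.1) ++ PySem.List.slice p.2 (some (p.1 + 1)) (some n)))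

-- ===== PRECONDITION & SPEC =====
-- Pre_: every row has at least len(L) entries; on shorter rows A raises IndexError at L[row][col].
def Pre_get_diagonal_and_non_diagonal2 (L : List (List Int)) : Prop :=
  ∀ row ∈ L, L.length ≤ row.length
instance (L : List (List Int)) : Decidable (Pre_get_diagonal_and_non_diagonal2 L) := by
  unfold Pre_get_diagonal_and_non_diagonal2; infer_instance

def pvWitness_get_diagonal_and_non_diagonal2 : List (List Int) := [[1, 3, 5], [2, 4, 5], [4, 0, 8]]

def Spec_get_diagonal_and_non_diagonal2 (L : List (List Int)) (out : List Int × List Int) : Prop := out = get_diagonal_and_non_diagonal2_alt L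
instance (L : List (List Int)) (out : List Int × List Int) : Decidable (Spec_get_diagonal_and_non_diagonal2 L out) := by unfold Spec_get_diagonal_and_non_diagonal2; infer_instance

-- ===== CLAIM (what is proved, stated in full; the proofs are below) =====
def Claim_equal_get_diagonal_and_non_diagonal2 : Prop := ∀ (L : List (List Int)), Dom_get_diagonal_and_non_diagonal2 L → Pre_get_diagonal_and_non_diagonal2 L → Spec_get_diagonal_and_non_diagonal2 L (get_diagonal_and_non_diagonal2 L)

-- ===== LEMMAS AND PROOFS =====

-- A fold that appends one diagonal element and a block of non-diagonal elements per step.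
theorem pv_pair_foldl (l : List Int) (f : Int → Int) (g : Int → List Int) (d nd : List Int) :
    l.foldl (fun st x => (st.1 ++ [f x], st.2 ++ g x)) (d, nd) = (d ++ l.map f, nd ++ l.flatMap g) := by
  induction l generalizing d nd with
  | nil => simp
  | cons x xs ih => simp [List.foldl_cons, ih]

-- Segment of the inner loop where the branch col ≠ j always fires.
theorem pv_nodiag_fold (row : List Int) (j : Int) (l : List Int) (h : ∀ c ∈ l, ¬ (j == c) = true)
    (d nd : List Int) :
    l.foldl (fun st col =>
      if j == col then (st.1 ++ [PySem.List.pyGetD row col 0], st.2)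
      else (st.1, st.2 ++ [PySem.List.pyGetD row col 0])) (d, nd)
      = (d, nd ++ l.map (fun c => PySem.List.pyGetD row c 0)) := by
  induction l generalizing d nd with
  | nil => simp
  | cons c cs ih =>
      have hc : ¬ (j == c) = true := h c (by simp)
      simp only [List.foldl_cons, if_neg hc]
      rw [ih (fun c hmem => h c (by simp [hmem]))]
      simp

-- Map of pyGetD over an integer range equals a drop/take window (all indices in range).
theorem pv_map_range_getD (row : List Int) (a b : Int) (ha : 0 ≤ a) (hab : a ≤ b)
    (hb : b ≤ (row.length : Int)) :
    (PySem.List.pyRange a b 1).map (fun c => PySem.List.pyGetD row c 0)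
      = (row.drop a.toNat).take (b.toNat - a.toNat) := by
  rw [PySem.List.pyRange_one]
  apply List.ext_getElem
  · simp; omega
  · intro k h1 h2
    have hk : k < (b - a).toNat := by simpa using h1
    have hcast : a + (k : Int) = ((a.toNat + k : Nat) : Int) := by omega
    have hlt : a.toNat + k < row.length := by omega
    simp only [List.getElem_map, List.getElem_range, hcast, PySem.List.pyGetD_natCast,
      List.getElem_take, List.getElem_drop]
    rw [List.getD_eq_getElem _ _ hlt]

-- The inner loop of A for a fixed row index j.
theorem pv_inner (row : List Int) (n j : Int) (h0 : 0 ≤ j) (hj : j < n)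
    (hn : n ≤ (row.length : Int)) (d nd : List Int) :
    (PySem.List.pyRange 0 n 1).foldl (fun st col =>
      if j == col then (st.1 ++ [PySem.List.pyGetD row col 0], st.2)
      else (st.1, st.2 ++ [PySem.List.pyGetD row col 0])) (d, nd)
      = (d ++ [PySem.List.pyGetD row j 0],
         nd ++ (PySem.List.slice row none (some j) ++ PySem.List.slice row (some (j + 1)) (some n))) := by
  have hsplit : PySem.List.pyRange 0 n 1
      = PySem.List.pyRange 0 j 1 ++ (j :: PySem.List.pyRange (j + 1) n 1) := by
    rw [PySem.List.pyRange_one_append 0 j n h0 (by omega), PySem.List.pyRange_one_cons hj]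
  rw [hsplit, List.foldl_append]
  rw [pv_nodiag_fold row j (PySem.List.pyRange 0 j 1) (by
    intro c hc; rw [PySem.List.mem_pyRange_one] at hc; simp only [beq_iff_eq]; omega) d nd]
  simp only [List.foldl_cons, if_pos (by simp : (j == j) = true)]
  rw [pv_nodiag_fold row j (PySem.List.pyRange (j + 1) n 1) (by
    intro c hc; rw [PySem.List.mem_pyRange_one] at hc; simp only [beq_iff_eq]; omega)]
  rw [pv_map_range_getD row 0 j (le_refl 0) h0 (by omega),
      pv_map_range_getD row (j + 1) n (by omega) (by omega) hn]
  rw [PySem.List.slice_to row h0, PySem.List.slice_toNat row (by omega) (by omega)]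
  simp

-- ===== VERDICT (by name: the statement is the Claim_ definition above) =====
theorem get_diagonal_and_non_diagonal2_spec : Claim_equal_get_diagonal_and_non_diagonal2 := by
  intro L _ hpre
  unfold Spec_get_diagonal_and_non_diagonal2
  unfold get_diagonal_and_non_diagonal2 get_diagonal_and_non_diagonal2_alt
  simp only []
  rw [PySem.List.enumerate_eq_map_pyRange L ([] : List Int)]
  rw [List.map_map, List.flatMap_map]
  rw [PySem.List.foldl_congr_mem (g := fun st (row : Int) =>
    (st.1 ++ [PySem.List.pyGetD (PySem.List.pyGetD L row []) row 0],
     st.2 ++ (PySem.List.slice (PySem.List.pyGetD L row []) none (some row)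
          ++ PySem.List.slice (PySem.List.pyGetD L row []) (some (row + 1)) (some (L.length : Int)))))]
  · rw [pv_pair_foldl]
    simp
  · intro st row hrow
    simp only [PySem.List.mem_pyRange_one] at hrow
    have hmem : PySem.List.pyGetD L row [] ∈ L :=
      PySem.List.pyGetD_mem L ([] : List Int) (by simp [PySem.Raise.InRange]; omega)
    exact pv_inner _ _ row hrow.1 hrow.2 (by exact_mod_cast hpre _ hmem) st.1 st.2
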